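-- pv_equiv track=rewrite | github.com/Cho-El/Python-coding-test-practice | 프로그래머스 문제/파이썬/2023 카카오블라이드채용/표현가능한 이진트리.py | checkBinaryTree
-- ===== SOURCE A (Python) =====
-- def checkBinaryTree(target, startIdx, endIdx, isNode):
--     if startIdx > endIdx:
--         return True
--     mid = (startIdx + endIdx) // 2
--
--     # 이진트리가 될 수 없는 경우
--     if not int(isNode) and target[mid] == '1':
--         return False
--
--     leftTree = checkBinaryTree(target, startIdx, mid - 1, target[mid])
--     if leftTree:
--         rightTree = checkBinaryTree(target, mid + 1, endIdx, target[mid])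
--         if rightTree:
--             return True
--         else:
--             return False
--     else:
--         return False
-- ===== SOURCE B (Python) =====
-- def checkBinaryTree(target, startIdx, endIdx, isNode):
--     # Level-order (BFS) validation: process the segment tree one level at a time with a
--     # queue of (start, end, parentZero) frames; a node is invalid iff its parent bit is
--     # zero and its own character is '1'.
--     if startIdx > endIdx:
--         return True
--     level = [(startIdx, endIdx, int(isNode) == 0)]
--     while level:
--         nxt = []
--         for s, e, pz in level:
--             if s > e:
--                 continue
--             mid = (s + e) // 2
--             c = target[mid]
--             if pz and c == '1':
--                 return False
--             cz = c == '0'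
--             nxt.append((s, mid - 1, cz))
--             nxt.append((mid + 1, e, cz))
--         level = nxt
--     return True
-- ===== Notes on version B (the rewrite author's own statement) =====
-- stated objective: alternative
-- what changed: Replaces the preorder recursion with a level-order (BFS) loop that processes a queue of (start, end, parentZero) segments one level at a time, carrying the parent bit as a boolean instead of a character string.
-- outside the precondition, e.g. on checkBinaryTree('10x', 0, 2, '1'): A returns False, B returns False; on checkBinaryTree('11', -2, -1, '1'): A returns True, B returns True
import Mathlib
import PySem

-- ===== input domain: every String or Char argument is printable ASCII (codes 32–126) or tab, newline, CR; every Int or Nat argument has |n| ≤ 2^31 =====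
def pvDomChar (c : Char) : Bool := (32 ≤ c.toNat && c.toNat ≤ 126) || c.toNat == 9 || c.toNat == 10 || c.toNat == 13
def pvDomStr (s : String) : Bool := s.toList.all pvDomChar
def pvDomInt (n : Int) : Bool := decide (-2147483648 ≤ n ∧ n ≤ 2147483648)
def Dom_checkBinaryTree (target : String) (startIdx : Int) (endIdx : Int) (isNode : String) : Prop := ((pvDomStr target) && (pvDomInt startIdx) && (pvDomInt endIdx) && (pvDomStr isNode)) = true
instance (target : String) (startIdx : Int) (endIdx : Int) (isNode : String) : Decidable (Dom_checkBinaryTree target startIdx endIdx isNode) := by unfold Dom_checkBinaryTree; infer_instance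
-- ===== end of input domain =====

-- B replaces A's preorder recursion with a level-order (BFS) loop over a queue of
-- (start, end, parentZero) frames (objective: alternative decomposition).


-- ===== PORT A =====
-- Literal port of A's recursion; the Nat fuel argument only makes the same computation
-- total (it strictly exceeds the range length, so the fuel-0 branch is never reached).
-- Where the Python raises (int(isNode) on a non-numeric string, target[mid] out of range)
-- the PySem primitive returns none and the port returns false; excluded by Pre_checkBinaryTree.
def checkBinaryTreeGo (target : String) : Nat → Int → Int → String → Bool
  | 0, _, _, _ => true
  | fuel + 1, s, e, node =>
    if s > e then true
    else
      let mid := PySem.Int.floordiv (s + e) 2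
      match PySem.Int.ofStr? node, PySem.Str.pyGet? target mid with
      | some n, some c =>
        if n == 0 && c == '1' then false
        else
          let leftTree := checkBinaryTreeGo target fuel s (mid - 1) (String.ofList [c])
          if leftTree then
            let rightTree := checkBinaryTreeGo target fuel (mid + 1) e (String.ofList [c])
            if rightTree then true else false
          else false
      | _, _ => false   -- Python raises here (outside Pre_)

def checkBinaryTree (target : String) (startIdx : Int) (endIdx : Int) (isNode : String) : Bool :=
  checkBinaryTreeGo target ((endIdx + 1 - startIdx).toNat + 1) startIdx endIdx isNode

-- ===== PORT B =====
-- Port of Source B's BFS: cbtRow is the body of one 'while' iteration (the 'for' over the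
-- current level building 'nxt'); 'none' is Source B's early 'return False', and also where
-- the Python raises (target[mid] out of range — outside Pre_).
def cbtRow (target : String) : List (Int × Int × Bool) → Option (List (Int × Int × Bool))
  | [] => some []
  | (s, e, pz) :: rest =>
    if s > e then cbtRow target rest
    else
      let mid := PySem.Int.floordiv (s + e) 2
      match PySem.Str.pyGet? target mid with
      | none => none   -- Python raises here (outside Pre_)
      | some c =>
        if pz && c == '1' then none   -- return False
        else
          let cz := c == '0'
          match cbtRow target rest with
          | none => none
          | some nxt => some ((s, mid - 1, cz) :: (mid + 1, e, cz) :: nxt)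

-- The 'while level:' loop; the Nat fuel bounds the number of levels (it strictly exceeds
-- the total size of the queued ranges, so the fuel-0 branch is never reached).
def cbtBfs (target : String) : Nat → List (Int × Int × Bool) → Bool
  | 0, _ => true
  | _ + 1, [] => true
  | fuel + 1, fr :: level =>
    match cbtRow target (fr :: level) with
    | none => false
    | some nxt => cbtBfs target fuel nxt

def checkBinaryTree_alt (target : String) (startIdx : Int) (endIdx : Int) (isNode : String) : Bool :=
  if startIdx > endIdx then true
  else
    match PySem.Int.ofStr? isNode with
    | none => false   -- Python raises here (outside Pre_)
    | some n => cbtBfs target ((endIdx + 1 - startIdx).toNat + 1) [(startIdx, endIdx, n == 0)]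

-- ===== PRECONDITION & SPEC =====
-- Python A raises on some inputs (ValueError from int(isNode), IndexError from target[mid]).
-- Pre_ keeps the trivial empty-range case and otherwise conservatively requires in-range
-- nonnegative indices, an int-parsable isNode and only digit characters on the inspected
-- segment; this also excludes some inputs on which A still returns: when an early failure
-- short-circuits before reaching a bad character, or when a negative index wraps around.
def Pre_checkBinaryTree (target : String) (startIdx : Int) (endIdx : Int) (isNode : String) : Prop :=
  startIdx > endIdx ∨
    (0 ≤ startIdx ∧ endIdx < (target.toList.length : Int) ∧
      (PySem.Int.ofStr? isNode).isSome = true ∧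
      ((PySem.List.pyRange startIdx (endIdx + 1) 1).all (fun i =>
        match PySem.Str.pyGet? target i with
        | some c => c.isDigit
        | none => true)) = true)
instance (target : String) (startIdx : Int) (endIdx : Int) (isNode : String) : Decidable (Pre_checkBinaryTree target startIdx endIdx isNode) := by unfold Pre_checkBinaryTree; infer_instance

def pvWitness_checkBinaryTree : String × Int × Int × String := ("110", 0, 2, "1")

def Spec_checkBinaryTree (target : String) (startIdx : Int) (endIdx : Int) (isNode : String) (out : Bool) : Prop := out = checkBinaryTree_alt target startIdx endIdx isNode
instance (target : String) (startIdx : Int) (endIdx : Int) (isNode : String) (out : Bool) : Decidable (Spec_checkBinaryTree target startIdx endIdx isNode out) := by unfold Spec_checkBinaryTree; infer_instance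

-- ===== CLAIM (what is proved, stated in full; the proofs are below) =====
def Claim_equal_checkBinaryTree : Prop := ∀ (target : String) (startIdx : Int) (endIdx : Int) (isNode : String), Dom_checkBinaryTree target startIdx endIdx isNode → Pre_checkBinaryTree target startIdx endIdx isNode → Spec_checkBinaryTree target startIdx endIdx isNode (checkBinaryTree target startIdx endIdx isNode)

-- ===== LEMMAS AND PROOFS =====

-- Reference function for A's recursion without the fuel guard (proof-side only).
def cbtRef (target : String) (s : Int) (e : Int) (node : String) : Bool :=
  if s > e then true
  else
    let mid := PySem.Int.floordiv (s + e) 2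
    match PySem.Int.ofStr? node, PySem.Str.pyGet? target mid with
    | some n, some c =>
      if n == 0 && c == '1' then false
      else
        if cbtRef target s (mid - 1) (String.ofList [c]) then
          if cbtRef target (mid + 1) e (String.ofList [c]) then true else false
        else false
    | _, _ => false
termination_by (e + 1 - s).toNat
decreasing_by
  all_goals
    have h := PySem.Int.floordiv_two_mid_bounds (lo := s) (hi := e) (by omega)
    omega

-- With enough fuel, the fuel-guarded recursion of port A computes cbtRef.
theorem checkBinaryTreeGo_eq_ref (target : String) :
    ∀ (fuel : Nat) (s e : Int) (node : String), (e + 1 - s).toNat < fuel →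
      checkBinaryTreeGo target fuel s e node = cbtRef target s e node := by
  intro fuel
  induction fuel with
  | zero => intro s e node h; omega
  | succ f ih =>
    intro s e node _
    rw [cbtRef, checkBinaryTreeGo]
    by_cases hse : s > e
    · simp [hse]
    · have hmid := PySem.Int.floordiv_two_mid_bounds (lo := s) (hi := e) (by omega)
      simp only [hse, if_false]
      cases PySem.Int.ofStr? node with
      | none => rfl
      | some n =>
        cases PySem.Str.pyGet? target (PySem.Int.floordiv (s + e) 2) with
        | none => rfl
        | some c =>
          simp only []
          rw [ih s (PySem.Int.floordiv (s + e) 2 - 1) (String.ofList [c]) (by omega),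
              ih (PySem.Int.floordiv (s + e) 2 + 1) e (String.ofList [c]) (by omega)]

-- Reference function for B: the per-frame check with the parent bit as a Bool.
def cbtRefB (target : String) (s : Int) (e : Int) (pz : Bool) : Bool :=
  if s > e then true
  else
    let mid := PySem.Int.floordiv (s + e) 2
    match PySem.Str.pyGet? target mid with
    | none => false
    | some c =>
      if pz && c == '1' then false
      else cbtRefB target s (mid - 1) (c == '0') && cbtRefB target (mid + 1) e (c == '0')
termination_by (e + 1 - s).toNat
decreasing_by
  all_goals
    have h := PySem.Int.floordiv_two_mid_bounds (lo := s) (hi := e) (by omega)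
    omega

def cbtMsr (fr : Int × Int × Bool) : Nat := (fr.2.1 + 1 - fr.1).toNat

def cbtOk (target : String) (fr : Int × Int × Bool) : Bool := cbtRefB target fr.1 fr.2.1 fr.2.2

-- A failing row means some frame of the level fails.
theorem cbtRow_none (target : String) :
    ∀ level : List (Int × Int × Bool), cbtRow target level = none →
      level.all (cbtOk target) = false := by
  intro level
  induction level with
  | nil => intro h; simp [cbtRow] at h
  | cons fr rest ih =>
    obtain ⟨s, e, pz⟩ := fr
    intro h
    rw [cbtRow] at h
    rw [List.all_cons]
    by_cases hse : s > e
    · simp only [hse, if_true] at h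
      rw [ih h, Bool.and_false]
    · have hmid := PySem.Int.floordiv_two_mid_bounds (lo := s) (hi := e) (by omega)
      simp only [hse, if_false] at h
      cases hc : PySem.Str.pyGet? target (PySem.Int.floordiv (s + e) 2) with
      | none =>
        have : cbtOk target (s, e, pz) = false := by
          simp only [cbtOk]; rw [cbtRefB]; simp only [hse, if_false, hc]
        rw [this, Bool.false_and]
      | some c =>
        rw [hc] at h
        by_cases hfail : (pz && c == '1') = true
        · have : cbtOk target (s, e, pz) = false := by
            simp only [cbtOk]; rw [cbtRefB]; simp only [hse, if_false, hc, hfail, if_true]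
          rw [this, Bool.false_and]
        · simp only [hfail] at h
          cases hr : cbtRow target rest with
          | none => rw [ih hr, Bool.and_false]
          | some nxt => rw [hr] at h; simp at h
  
-- A successful row preserves the level's conjunction and shrinks (or empties) the queue.
theorem cbtRow_some (target : String) :
    ∀ (level nxt : List (Int × Int × Bool)), cbtRow target level = some nxt →
      level.all (cbtOk target) = nxt.all (cbtOk target) ∧
        ((nxt.map cbtMsr).sum < (level.map cbtMsr).sum ∨ nxt = []) := by
  intro level
  induction level with
  | nil => intro nxt h; rw [cbtRow] at h; cases h; exact ⟨rfl, Or.inr rfl⟩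
  | cons fr rest ih =>
    obtain ⟨s, e, pz⟩ := fr
    intro nxt h
    rw [cbtRow] at h
    by_cases hse : s > e
    · simp only [hse, if_true] at h
      obtain ⟨h1, h2⟩ := ih nxt h
      constructor
      · rw [List.all_cons, ← h1]
        have : cbtOk target (s, e, pz) = true := by
          simp only [cbtOk]; rw [cbtRefB]; simp only [hse, if_true]
        rw [this, Bool.true_and]
      · rcases h2 with h2 | h2
        · left
          simp only [List.map_cons, List.sum_cons, cbtMsr]
          omega
        · exact Or.inr h2
    · have hmid := PySem.Int.floordiv_two_mid_bounds (lo := s) (hi := e) (by omega)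
      simp only [hse, if_false] at h
      cases hc : PySem.Str.pyGet? target (PySem.Int.floordiv (s + e) 2) with
      | none => rw [hc] at h; simp at h
      | some c =>
        rw [hc] at h
        by_cases hfail : (pz && c == '1') = true
        · simp [hfail] at h
        · simp only [hfail] at h
          cases hr : cbtRow target rest with
          | none => rw [hr] at h; simp at h
          | some nxt' =>
            rw [hr] at h
            simp only [Bool.false_eq_true, if_false, Option.some.injEq] at h
            subst h
            obtain ⟨h1, h2⟩ := ih nxt' hr
            constructor
            · rw [List.all_cons, List.all_cons, List.all_cons, ← h1]
              have : cbtOk target (s, e, pz) =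
                  (cbtOk target (s, PySem.Int.floordiv (s + e) 2 - 1, (c == '0')) &&
                   cbtOk target (PySem.Int.floordiv (s + e) 2 + 1, e, (c == '0'))) := by
                simp only [cbtOk]
                conv_lhs => rw [cbtRefB]
                simp only [hse, if_false, hc, hfail, Bool.false_eq_true]
              rw [this, Bool.and_assoc]
            · left
              have hle : (nxt'.map cbtMsr).sum ≤ (rest.map cbtMsr).sum := by
                rcases h2 with h2 | h2
                · omega
                · subst h2; simp
              simp only [List.map_cons, List.sum_cons, cbtMsr]
              omega

-- With enough fuel, B's level loop returns the conjunction of cbtRefB over the queue.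
theorem cbtBfs_eq_all (target : String) :
    ∀ (fuel : Nat) (level : List (Int × Int × Bool)), (level.map cbtMsr).sum < fuel →
      cbtBfs target fuel level = level.all (cbtOk target) := by
  intro fuel
  induction fuel with
  | zero => intro level h; omega
  | succ f ih =>
    intro level hf
    match level with
    | [] => rfl
    | fr :: rest =>
      rw [cbtBfs]
      cases hr : cbtRow target (fr :: rest) with
      | none => rw [cbtRow_none target _ hr]
      | some nxt =>
        obtain ⟨h1, h2⟩ := cbtRow_some target _ _ hr
        rw [h1]
        rcases h2 with h2 | h2
        · exact ih nxt (by omega)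
        · subst h2; cases f <;> rfl

-- For a digit character, int() of its one-character string succeeds and is zero iff '0'.
theorem digit_enum (c : Char) (h : c.isDigit = true) :
    c = '0' ∨ c = '1' ∨ c = '2' ∨ c = '3' ∨ c = '4' ∨ c = '5' ∨ c = '6' ∨ c = '7' ∨ c = '8' ∨ c = '9' := by
  simp only [Char.isDigit, decide_eq_true_eq, Bool.and_eq_true] at h
  have h1 : 48 ≤ c.toNat := by exact_mod_cast h.1
  have h2 : c.toNat ≤ 57 := by exact_mod_cast h.2
  have hv : c.toNat = 48 ∨ c.toNat = 49 ∨ c.toNat = 50 ∨ c.toNat = 51 ∨ c.toNat = 52 ∨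
      c.toNat = 53 ∨ c.toNat = 54 ∨ c.toNat = 55 ∨ c.toNat = 56 ∨ c.toNat = 57 := by omega
  rcases hv with h|h|h|h|h|h|h|h|h|h <;>
    [exact Or.inl (Char.ext (UInt32.toNat_inj.mp h));
     exact Or.inr (Or.inl (Char.ext (UInt32.toNat_inj.mp h)));
     exact Or.inr (Or.inr (Or.inl (Char.ext (UInt32.toNat_inj.mp h))));
     exact Or.inr (Or.inr (Or.inr (Or.inl (Char.ext (UInt32.toNat_inj.mp h)))));
     exact Or.inr (Or.inr (Or.inr (Or.inr (Or.inl (Char.ext (UInt32.toNat_inj.mp h))))));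
     exact Or.inr (Or.inr (Or.inr (Or.inr (Or.inr (Or.inl (Char.ext (UInt32.toNat_inj.mp h)))))));
     exact Or.inr (Or.inr (Or.inr (Or.inr (Or.inr (Or.inr (Or.inl (Char.ext (UInt32.toNat_inj.mp h))))))));
     exact Or.inr (Or.inr (Or.inr (Or.inr (Or.inr (Or.inr (Or.inr (Or.inl (Char.ext (UInt32.toNat_inj.mp h)))))))));
     exact Or.inr (Or.inr (Or.inr (Or.inr (Or.inr (Or.inr (Or.inr (Or.inr (Or.inl (Char.ext (UInt32.toNat_inj.mp h))))))))));
     exact Or.inr (Or.inr (Or.inr (Or.inr (Or.inr (Or.inr (Or.inr (Or.inr (Or.inr (Char.ext (UInt32.toNat_inj.mp h))))))))))]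

theorem digit_node (c : Char) (h : c.isDigit = true) :
    ∃ n : Int, PySem.Int.ofStr? (String.ofList [c]) = some n ∧ ((n == 0) = (c == '0')) := by
  rcases digit_enum c h with h|h|h|h|h|h|h|h|h|h <;> subst h
  · exact ⟨0, by decide⟩
  · exact ⟨1, by decide⟩
  · exact ⟨2, by decide⟩
  · exact ⟨3, by decide⟩
  · exact ⟨4, by decide⟩
  · exact ⟨5, by decide⟩
  · exact ⟨6, by decide⟩
  · exact ⟨7, by decide⟩
  · exact ⟨8, by decide⟩
  · exact ⟨9, by decide⟩

-- On a segment of digit characters, A's recursion equals B's per-frame check.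
theorem refA_eq_refB (target : String) (s e : Int) (node : String) (n : Int)
    (hn : PySem.Int.ofStr? node = some n) (hs : 0 ≤ s)
    (hdig : ∀ i : Int, s ≤ i → i ≤ e → ∀ c, PySem.Str.pyGet? target i = some c → c.isDigit = true) :
    cbtRef target s e node = cbtRefB target s e (n == 0) := by
  rw [cbtRef, cbtRefB]
  by_cases hse : s > e
  · simp [hse]
  · have hmid := PySem.Int.floordiv_two_mid_bounds (lo := s) (hi := e) (by omega)
    simp only [hse, if_false, hn]
    cases hc : PySem.Str.pyGet? target (PySem.Int.floordiv (s + e) 2) with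
    | none => rfl
    | some c =>
      have hcd : c.isDigit = true := hdig _ (by omega) (by omega) c hc
      obtain ⟨m, hm1, hm2⟩ := digit_node c hcd
      by_cases hfail : (n == 0 && c == '1') = true
      · simp [hfail]
      · simp only [hfail]
        rw [refA_eq_refB target s (PySem.Int.floordiv (s + e) 2 - 1) _ m hm1 hs
              (fun i h1 h2 => hdig i h1 (by omega)),
            refA_eq_refB target (PySem.Int.floordiv (s + e) 2 + 1) e _ m hm1 (by omega)
              (fun i h1 h2 => hdig i (by omega) h2), hm2]
        cases cbtRefB target s (PySem.Int.floordiv (s + e) 2 - 1) (c == '0') <;>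
          cases cbtRefB target (PySem.Int.floordiv (s + e) 2 + 1) e (c == '0') <;> simp
termination_by (e + 1 - s).toNat
decreasing_by
  all_goals omega

-- ===== VERDICT (by name: the statement is the Claim_ definition above) =====
theorem checkBinaryTree_spec : Claim_equal_checkBinaryTree := by
  intro target startIdx endIdx isNode _ hpre
  unfold Spec_checkBinaryTree checkBinaryTree checkBinaryTree_alt
  rw [checkBinaryTreeGo_eq_ref target _ _ _ _ (by omega)]
  by_cases hse : startIdx > endIdx
  · rw [cbtRef]; simp [hse]
  · rcases hpre with hpre | ⟨h0, hlen, hsome, hdig⟩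
    · omega
    · simp only [hse, if_false]
      obtain ⟨n, hn⟩ := Option.isSome_iff_exists.mp hsome
      rw [hn]
      show cbtRef target startIdx endIdx isNode =
        cbtBfs target ((endIdx + 1 - startIdx).toNat + 1) [(startIdx, endIdx, n == 0)]
      rw [cbtBfs_eq_all target _ _
            (by simp only [List.map_cons, List.map_nil, List.sum_cons, List.sum_nil, cbtMsr]; omega)]
      have hd : ∀ i : Int, startIdx ≤ i → i ≤ endIdx → ∀ c,
          PySem.Str.pyGet? target i = some c → c.isDigit = true := by
        intro i h1 h2 c hc
        have hmem : i ∈ PySem.List.pyRange startIdx (endIdx + 1) 1 :=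
          (PySem.List.mem_pyRange_one).mpr ⟨h1, by omega⟩
        have := List.all_eq_true.mp hdig i hmem
        have hc' : PySem.List.pyGet? target.toList i = some c := by
          simpa [PySem.Str.pyGet?] using hc
        simpa [hc'] using this
      have := refA_eq_refB target startIdx endIdx isNode n hn h0 hd
      simp only [List.all_cons, List.all_nil, Bool.and_true, cbtOk]
      exact this
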